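-- pv_equiv track=rewrite | github.com/dash-star/PythonSummerClass | assignment2/challenges.py | part4
-- ===== SOURCE A (Python) =====
-- def part4(text1, text2):
--     # check the lengths of the words.
--     # if lengths are equal, they are possibly isomorphic, else return false
--     if len(text1) != len(text2):
--         return False
--     # get array to map each letter to another. Based on mapping of text1
--     list = dict()
--     for i in range(0, len(text1)):
--         char1 = text1[i]
--         char2 = text2[i]
--         # does char1 (text1 letter) already have a mapping?
--         if char1 in list:
--             # exists in the dictionary/pair. Is this one matching?
--             if list.get(char1) != char2:
--                 # different mapping! return false
--                 return False
--         else: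
--             # new letter! add it to dictionary to signify a mapping
--             list[char1] = char2
--     # if code is here, that means that word set is isomorphic, so return true
--     return True
-- ===== SOURCE B (Python) =====
-- def part4(text1, text2):
--     if len(text1) != len(text2):
--         return False
--     return len(set(zip(text1, text2))) == len(set(text1))
-- ===== Notes on version B (the rewrite author's own statement) =====
-- stated objective: idiomatic
-- what changed: Replaces the incremental char-to-char dict with early exit by a whole-input set-cardinality comparison: len(set(zip(text1, text2))) == len(set(text1)) after the same length guard.
import Mathlib
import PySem

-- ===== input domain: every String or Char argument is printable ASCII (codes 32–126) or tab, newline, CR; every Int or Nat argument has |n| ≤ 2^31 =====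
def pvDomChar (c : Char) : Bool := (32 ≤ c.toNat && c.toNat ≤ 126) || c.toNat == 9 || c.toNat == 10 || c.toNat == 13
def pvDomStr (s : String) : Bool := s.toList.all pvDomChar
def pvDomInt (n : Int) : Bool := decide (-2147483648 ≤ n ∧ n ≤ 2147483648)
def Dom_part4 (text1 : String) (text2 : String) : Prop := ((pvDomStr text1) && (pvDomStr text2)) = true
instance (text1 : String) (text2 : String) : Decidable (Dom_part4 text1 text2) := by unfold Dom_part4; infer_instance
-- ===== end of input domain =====

-- B replaces A's incremental char-to-char dict with early exit by one set-cardinality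
-- comparison after the same length guard (objective: idiomatic; same cost).

-- ===== PORT A =====
-- the 'for i in range(0, len(text1))' loop with the dict 'list' and early 'return False'
def part4Loop (cs1 cs2 : List Char) : List Int → PySem.Dict Char Char → Bool
  | [], _ => true
  | i :: rest, d =>
    match PySem.List.pyGet? cs1 i, PySem.List.pyGet? cs2 i with
    | some char1, some char2 =>
      if d.contains char1 then
        if d.get? char1 != some char2 then false
        else part4Loop cs1 cs2 rest d
      else part4Loop cs1 cs2 rest (d.insert char1 char2)
    | _, _ => false  -- IndexError; unreachable for indices from range(0, len)

def part4 (text1 : String) (text2 : String) : Bool :=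
  if PySem.Str.len text1 != PySem.Str.len text2 then false
  else part4Loop text1.toList text2.toList
    (PySem.List.pyRange 0 (PySem.Str.len text1) 1) PySem.Dict.empty

-- ===== PORT B =====
def part4_alt (text1 : String) (text2 : String) : Bool :=
  if PySem.Str.len text1 != PySem.Str.len text2 then false
  else PySem.Set.len (PySem.Set.ofList (text1.toList.zip text2.toList))
        == PySem.Set.len (PySem.Set.ofList text1.toList)

-- ===== PRECONDITION & SPEC =====
def Spec_part4 (text1 : String) (text2 : String) (out : Bool) : Prop := out = part4_alt text1 text2
instance (text1 : String) (text2 : String) (out : Bool) : Decidable (Spec_part4 text1 text2 out) := by unfold Spec_part4; infer_instance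

-- ===== CLAIM (what is proved, stated in full; the proofs are below) =====
def Claim_equal_part4 : Prop := ∀ (text1 : String) (text2 : String), Dom_part4 text1 text2 → Spec_part4 text1 text2 (part4 text1 text2)

-- ===== LEMMAS AND PROOFS =====

-- proof-side view of A's loop: iterate directly over the zipped pair list
def pairLoop : List (Char × Char) → PySem.Dict Char Char → Bool
  | [], _ => true
  | (a, b) :: rest, d =>
    if d.contains a then
      if d.get? a != some b then false
      else pairLoop rest d
    else pairLoop rest (d.insert a b)

-- the map given by d's lookups together with the pairs of ps is single-valued
def LoopInv (d : PySem.Dict Char Char) (ps : List (Char × Char)) : Prop :=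
  ∀ a b, (a, b) ∈ ps → ∀ c, (d.get? a = some c ∨ (a, c) ∈ ps) → c = b

-- ps is a single-valued relation (the empty-dict case of LoopInv)
def Func (ps : List (Char × Char)) : Prop :=
  ∀ a b, (a, b) ∈ ps → ∀ c, (a, c) ∈ ps → c = b

lemma part4Loop_shift (x y : Char) (xs ys : List Char) (ns : List Nat) (d : PySem.Dict Char Char) :
    part4Loop (x :: xs) (y :: ys) (ns.map (fun (k : Nat) => (k : Int) + 1)) d
      = part4Loop xs ys (ns.map (fun (k : Nat) => (k : Int))) d := by
  induction ns generalizing d with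
  | nil => rfl
  | cons n ns ih =>
    simp only [List.map_cons, part4Loop, PySem.List.pyGet?_cons_succ]
    cases h1 : PySem.List.pyGet? xs (n : Int) <;> cases h2 : PySem.List.pyGet? ys (n : Int) <;>
      simp [ih]

lemma part4Loop_eq_pairLoop (cs1 cs2 : List Char) (h : cs1.length = cs2.length)
    (d : PySem.Dict Char Char) :
    part4Loop cs1 cs2 ((List.range cs1.length).map (fun (k : Nat) => (k : Int))) d
      = pairLoop (cs1.zip cs2) d := by
  induction cs1 generalizing cs2 d with
  | nil => cases cs2 <;> simp_all [part4Loop, pairLoop]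
  | cons x xs ih =>
    cases cs2 with
    | nil => simp at h
    | cons y ys =>
      have hlen : xs.length = ys.length := by simpa using h
      simp only [List.length_cons, List.range_succ_eq_map, List.map_cons, List.map_map]
      have hmap : (List.range xs.length).map ((fun (k : Nat) => (k : Int)) ∘ Nat.succ)
          = (List.range xs.length).map (fun (k : Nat) => (k : Int) + 1) := by
        apply List.map_congr_left; intro k _; simp
      rw [hmap]
      rw [part4Loop]
      simp only [Nat.cast_zero, PySem.List.pyGet?_zero_cons, List.zip_cons_cons]
      rw [pairLoop]
      rw [part4Loop_shift, part4Loop_shift, ih ys hlen, ih ys hlen]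

lemma pairLoop_iff (ps : List (Char × Char)) (d : PySem.Dict Char Char) :
    pairLoop ps d = true ↔ LoopInv d ps := by
  induction ps generalizing d with
  | nil => simp [pairLoop, LoopInv]
  | cons p rest ih =>
    obtain ⟨a, b⟩ := p
    by_cases hc : d.contains a = true
    · obtain ⟨c0, hc0⟩ := Option.isSome_iff_exists.mp
        (PySem.Dict.contains_eq_isSome_get? d a ▸ hc)
      rw [pairLoop, if_pos hc, hc0]
      by_cases hcb : c0 = b
      · subst hcb
        rw [if_neg (by simp), ih]
        constructor
        · intro hinv x y hxy z hz
          rcases List.mem_cons.mp hxy with hhead | htail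
          · obtain ⟨rfl, rfl⟩ := Prod.mk.injEq .. ▸ hhead
            rcases hz with hz | hz
            · rw [hc0, Option.some.injEq] at hz; exact hz.symm
            · rcases List.mem_cons.mp hz with hz2 | hz2
              · exact (Prod.mk.injEq .. ▸ hz2).2
              · exact (hinv x z hz2 y (Or.inl hc0)).symm
          · rcases hz with hz | hz
            · exact hinv x y htail z (Or.inl hz)
            · rcases List.mem_cons.mp hz with hz2 | hz2
              · obtain ⟨rfl, rfl⟩ := Prod.mk.injEq .. ▸ hz2
                exact hinv x y htail z (Or.inl hc0)
              · exact hinv x y htail z (Or.inr hz2)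
        · intro hinv x y hxy z hz
          exact hinv x y (List.mem_cons_of_mem _ hxy) z
            (hz.imp id (List.mem_cons_of_mem _))
      · rw [if_pos (by simpa using hcb)]
        constructor
        · intro h; cases h
        · intro hinv
          exact absurd (hinv a b List.mem_cons_self c0 (Or.inl hc0)) hcb
    · rw [pairLoop, if_neg hc, ih]
      have hgn : d.get? a = none := by
        rw [PySem.Dict.contains_eq_isSome_get?] at hc
        exact Option.not_isSome_iff_eq_none.mp hc
      constructor
      · intro hinv x y hxy z hz
        rcases List.mem_cons.mp hxy with hhead | htail
        · obtain ⟨rfl, rfl⟩ := Prod.mk.injEq .. ▸ hhead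
          rcases hz with hz | hz
          · rw [hgn] at hz; cases hz
          · rcases List.mem_cons.mp hz with hz2 | hz2
            · exact (Prod.mk.injEq .. ▸ hz2).2
            · exact (hinv x z hz2 y (Or.inl (by rw [PySem.Dict.get?_insert]; simp))).symm
        · rcases hz with hz | hz
          · have hxa : x ≠ a := by rintro rfl; rw [hgn] at hz; cases hz
            exact hinv x y htail z (Or.inl (by rw [PySem.Dict.get?_insert, if_neg hxa]; exact hz))
          · rcases List.mem_cons.mp hz with hz2 | hz2
            · obtain ⟨rfl, rfl⟩ := Prod.mk.injEq .. ▸ hz2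
              exact hinv x y htail z (Or.inl (by rw [PySem.Dict.get?_insert]; simp))
            · exact hinv x y htail z (Or.inr hz2)
      · intro hinv x y hxy z hz
        rcases hz with hz | hz
        · rw [PySem.Dict.get?_insert] at hz
          by_cases hxa : x = a
          · subst hxa
            rw [if_pos rfl, Option.some.injEq] at hz
            subst hz
            exact hinv x y (List.mem_cons_of_mem _ hxy) b
              (Or.inr List.mem_cons_self)
          · rw [if_neg hxa] at hz
            exact hinv x y (List.mem_cons_of_mem _ hxy) z (Or.inl hz)
        · exact hinv x y (List.mem_cons_of_mem _ hxy) z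
            (Or.inr (List.mem_cons_of_mem _ hz))

lemma loopInv_empty_iff (ps : List (Char × Char)) : LoopInv PySem.Dict.empty ps ↔ Func ps := by
  unfold LoopInv Func
  constructor
  · intro h a b hab c hc; exact h a b hab c (Or.inr hc)
  · intro h a b hab c hc
    rcases hc with hc | hc
    · rw [PySem.Dict.get?_empty] at hc; cases hc
    · exact h a b hab c hc

lemma card_eq_iff_func (ps : List (Char × Char)) :
    (PySem.Set.ofList ps).length = (PySem.Set.ofList (ps.map Prod.fst)).length ↔ Func ps := by
  have h1 : (PySem.Set.ofList ps).length = ps.toFinset.card := by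
    rw [← List.toFinset_card_of_nodup (PySem.Set.nodup_ofList ps)]
    congr 1
    ext x; simp [PySem.Set.mem_ofList]
  have h2 : (PySem.Set.ofList (ps.map Prod.fst)).length
      = (Finset.image Prod.fst ps.toFinset).card := by
    rw [← List.toFinset_card_of_nodup (PySem.Set.nodup_ofList (ps.map Prod.fst))]
    congr 1
    ext x; simp [PySem.Set.mem_ofList]
  rw [h1, h2, eq_comm, Finset.card_image_iff]
  constructor
  · intro hinj a b hab c hac
    have := @hinj (a, b) (by simpa using hab) (a, c) (by simpa using hac) rfl
    exact ((Prod.mk.injEq .. ▸ this).2).symm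
  · rintro hf ⟨a, b⟩ hab ⟨a', c⟩ hac hfst
    simp only [Finset.mem_coe, List.mem_toFinset] at hab hac
    simp only at hfst
    subst hfst
    exact congrArg (Prod.mk a) (hf a c hac b hab)

-- ===== VERDICT (by name: the statement is the Claim_ definition above) =====
theorem part4_spec : Claim_equal_part4 := by
  intro text1 text2 _
  unfold Spec_part4 part4 part4_alt
  by_cases hlen : PySem.Str.len text1 = PySem.Str.len text2
  · have hl : text1.toList.length = text2.toList.length := by simpa using hlen
    have hsl : text1.length = text2.length := by simpa using hlen
    rw [if_neg (by simp [hsl]), if_neg (by simp [hsl])]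
    rw [PySem.Str.len_eq, PySem.List.pyRange_zero_natCast,
      part4Loop_eq_pairLoop _ _ hl]
    set ps := text1.toList.zip text2.toList with hps
    have hfst : ps.map Prod.fst = text1.toList :=
      List.map_fst_zip (le_of_eq hl)
    have hA : pairLoop ps PySem.Dict.empty = true ↔ Func ps :=
      (pairLoop_iff ps PySem.Dict.empty).trans (loopInv_empty_iff ps)
    have hB : (PySem.Set.len (PySem.Set.ofList ps)
        == PySem.Set.len (PySem.Set.ofList text1.toList)) = true ↔ Func ps := by
      rw [← hfst, ← card_eq_iff_func ps]
      constructor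
      · intro h
        have h' := of_decide_eq_true h
        simpa [PySem.Set.len] using h'
      · intro h
        apply decide_eq_true
        simpa [PySem.Set.len] using h
    cases hA' : pairLoop ps PySem.Dict.empty <;>
      cases hB' : (PySem.Set.len (PySem.Set.ofList ps)
        == PySem.Set.len (PySem.Set.ofList text1.toList)) <;> simp_all
  · rw [if_pos (by simpa [bne_iff_ne] using hlen), if_pos (by simpa [bne_iff_ne] using hlen)]
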